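-- pv_equiv track=rewrite | github.com/stevemccoy/aoc2024 | py/day10/day10.py | trailhead_scores
-- ===== SOURCE A (Python) =====
-- def trailhead_scores(trails):
-- 	endpoints = [(t[0],t[-1]) for t in trails]
-- 	trailheads = {}
-- 	for (sp,ep) in endpoints:
-- 		if sp not in trailheads:
-- 			trailheads[sp] = set()
-- 		trailheads[sp].add(ep)
-- 	scores = {sp:len(epl) for (sp,epl) in trailheads.items()}
-- 	return scores
-- ===== SOURCE B (Python) =====
-- def trailhead_scores(trails):
-- 	# collect distinct start points in first-occurrence order, then rescan per start
-- 	endpoints = [(t[0], t[-1]) for t in trails]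
-- 	starts = []
-- 	for sp, _ep in endpoints:
-- 		if sp not in starts:
-- 			starts.append(sp)
-- 	return {sp: len({ep for s, ep in endpoints if s == sp}) for sp in starts}
-- ===== Notes on version B (the rewrite author's own statement) =====
-- stated objective: alternative
-- what changed: Instead of one pass growing a dict-of-sets, B first collects the distinct start points in first-occurrence order and then rescans the whole endpoint list once per start, counting that start's distinct endpoints with a set comprehension (nested scans, no incrementally maintained mapping).
import Mathlib
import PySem

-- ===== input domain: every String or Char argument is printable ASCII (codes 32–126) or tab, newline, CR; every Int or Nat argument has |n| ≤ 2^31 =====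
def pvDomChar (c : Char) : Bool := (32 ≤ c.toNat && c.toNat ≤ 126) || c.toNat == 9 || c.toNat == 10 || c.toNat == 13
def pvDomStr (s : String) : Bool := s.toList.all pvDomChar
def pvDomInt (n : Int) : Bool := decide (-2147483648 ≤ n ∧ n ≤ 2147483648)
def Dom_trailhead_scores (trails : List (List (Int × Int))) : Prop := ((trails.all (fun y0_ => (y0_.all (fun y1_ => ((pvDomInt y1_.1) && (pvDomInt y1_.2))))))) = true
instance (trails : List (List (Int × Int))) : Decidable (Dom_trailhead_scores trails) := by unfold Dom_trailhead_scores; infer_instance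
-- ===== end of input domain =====

-- B drops A's incrementally grown dict-of-sets: it collects the distinct start points in
-- first-occurrence order, then rescans the endpoint list once per start, counting that
-- start's distinct endpoints (objective: alternative decomposition, not faster).

-- ===== PORT A =====
-- shared endpoint extraction '(t[0], t[-1])' (the identical expression in both Pythons);
-- pyGetD's default is never reached under Pre_ (nonempty trails)
def pvEndpoint (t : List (Int × Int)) : (Int × Int) × (Int × Int) :=
  (PySem.List.pyGetD t 0 ((0 : Int), (0 : Int)), PySem.List.pyGetD t (-1) ((0 : Int), (0 : Int)))

-- the body of A's 'for (sp,ep) in endpoints' loop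
def pvStepA (d : PySem.Dict (Int × Int) (PySem.Set (Int × Int)))
    (p : (Int × Int) × (Int × Int)) : PySem.Dict (Int × Int) (PySem.Set (Int × Int)) :=
  let d' := if d.contains p.1 then d else d.insert p.1 PySem.Set.empty
  d'.insert p.1 (PySem.Set.add (d'.getD p.1 PySem.Set.empty) p.2)

def trailhead_scores (trails : List (List (Int × Int))) : List (Int × Int × Int) :=
  let endpoints := trails.map pvEndpoint
  let trailheads := endpoints.foldl pvStepA PySem.Dict.empty
  trailheads.items.map (fun kv => (kv.1.1, kv.1.2, (PySem.Set.len kv.2 : Int)))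

-- ===== PORT B =====
-- the body of B's 'if sp not in starts: starts.append(sp)' loop
def pvCollect (acc : List (Int × Int)) (p : (Int × Int) × (Int × Int)) : List (Int × Int) :=
  if p.1 ∈ acc then acc else acc ++ [p.1]

def trailhead_scores_alt (trails : List (List (Int × Int))) : List (Int × Int × Int) :=
  let endpoints := trails.map pvEndpoint
  let starts := endpoints.foldl pvCollect []
  starts.map (fun sp => (sp.1, sp.2,
    (PySem.Set.len (PySem.Set.ofList ((endpoints.filter (fun q => q.1 == sp)).map (·.2))) : Int)))

-- ===== PRECONDITION & SPEC =====
-- Pre_ excludes a trail that is the empty list: there 't[0]' makes Python A raise IndexError (B too).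
def Pre_trailhead_scores (trails : List (List (Int × Int))) : Prop := ∀ t ∈ trails, t ≠ []
instance (trails : List (List (Int × Int))) : Decidable (Pre_trailhead_scores trails) := by unfold Pre_trailhead_scores; infer_instance
def pvWitness_trailhead_scores : (List (List (Int × Int))) := ([[(0, 1), (2, 3)], [(0, 1), (5, 5)], [(7, 7)]])

def Spec_trailhead_scores (trails : List (List (Int × Int))) (out : List (Int × Int × Int)) : Prop := out = trailhead_scores_alt trails
instance (trails : List (List (Int × Int))) (out : List (Int × Int × Int)) : Decidable (Spec_trailhead_scores trails out) := by unfold Spec_trailhead_scores; infer_instance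

-- ===== CLAIM (what is proved, stated in full; the proofs are below) =====
def Claim_equal_trailhead_scores : Prop := ∀ (trails : List (List (Int × Int))), Dom_trailhead_scores trails → Pre_trailhead_scores trails → Spec_trailhead_scores trails (trailhead_scores trails)

-- ===== LEMMAS AND PROOFS =====

-- closed form of A's dict-of-sets loop: one item per distinct start, holding its distinct endpoints
theorem pv_itemsA (eps : List ((Int × Int) × (Int × Int))) :
    (eps.foldl pvStepA PySem.Dict.empty).items
      = (PySem.Set.ofList (eps.map (·.1))).map
          (fun sp => (sp, PySem.Set.ofList ((eps.filter (fun q => q.1 == sp)).map (·.2)))) := by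
  induction eps using List.reverseRecOn with
  | nil => rfl
  | append_singleton eps p ih =>
    rw [List.foldl_append, List.foldl_cons, List.foldl_nil]
    set d := eps.foldl pvStepA PySem.Dict.empty with hd
    have hkeys : d.keys = PySem.Set.ofList (eps.map (·.1)) := by
      show d.items.map (·.1) = _
      rw [ih, List.map_map]
      simp [Function.comp_def]
    have hnd : d.keys.Nodup := by rw [hkeys]; exact PySem.Set.nodup_ofList _
    have hcont : d.contains p.1 = decide (p.1 ∈ eps.map (·.1)) := by
      rw [PySem.Dict.contains_eq_decide_mem_keys, hkeys]
      exact decide_eq_decide.mpr (PySem.Set.mem_ofList _ _)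
    rw [List.map_append, List.map_singleton, PySem.Set.ofList_append_singleton]
    by_cases hp : p.1 ∈ eps.map (·.1)
    · -- existing key: the start already has a set; A adds the endpoint to it
      have hc : d.contains p.1 = true := by rw [hcont]; simp [hp]
      have hmem : (p.1, PySem.Set.ofList ((eps.filter (fun q => q.1 == p.1)).map (·.2))) ∈ d.items := by
        rw [ih]
        exact List.mem_map.mpr ⟨p.1, (PySem.Set.mem_ofList _ _).mpr hp, rfl⟩
      have hget : d.getD p.1 PySem.Set.empty
          = PySem.Set.ofList ((eps.filter (fun q => q.1 == p.1)).map (·.2)) :=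
        PySem.Dict.getD_of_mem_items d hmem hnd _
      have hstep : pvStepA d p = d.insert p.1 (PySem.Set.add (d.getD p.1 PySem.Set.empty) p.2) := by
        simp [pvStepA, hc]
      rw [hstep, PySem.Dict.items_insert_of_contains _ _ hc, ih,
          PySem.Set.add_of_mem ((PySem.Set.mem_ofList _ _).mpr hp), hget,
          List.map_map]
      apply List.map_congr_left
      intro sp hsp
      by_cases hsq : sp = p.1
      · subst hsq
        simp only [Function.comp_def, beq_self_eq_true, if_pos]
        rw [List.filter_append, List.filter_singleton]
        simp [PySem.Set.ofList_append_singleton]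
      · have hb : (sp == p.1) = false := by simp [hsq]
        simp only [Function.comp_def, hb, Bool.false_eq_true, if_false]
        rw [List.filter_append, List.filter_singleton]
        have : (p.1 == sp) = false := by simp [Ne.symm hsq]
        simp [this]
    · -- new key: A creates a fresh singleton set, appended at the end
      have hc : d.contains p.1 = false := by rw [hcont]; simp [hp]
      have hstep : pvStepA d p = (d.insert p.1 PySem.Set.empty).insert p.1
          (PySem.Set.add ((d.insert p.1 PySem.Set.empty).getD p.1 PySem.Set.empty) p.2) := by
        simp [pvStepA, hc]
      rw [hstep, PySem.Set.add_of_not_mem ((fun h => hp ((PySem.Set.mem_ofList _ _).mp h)))]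
      rw [PySem.Dict.getD_insert_self,
          PySem.Dict.items_insert_of_contains _ _ (PySem.Dict.contains_insert_self _ _ _),
          PySem.Dict.items_insert_of_not_contains _ _ hc, ih,
          List.map_append, List.map_append, List.map_singleton, List.map_singleton, List.map_map]
      congr 1
      · apply List.map_congr_left
        intro sp hsp
        have hne : sp ≠ p.1 := by
          rintro rfl
          exact hp ((PySem.Set.mem_ofList _ _).mp hsp)
        have hb : (sp == p.1) = false := by simp [hne]
        simp only [Function.comp_def, hb, Bool.false_eq_true, if_false]
        rw [List.filter_append, List.filter_singleton]
        have : (p.1 == sp) = false := by simp [Ne.symm hne]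
        simp [this]
      · simp only [beq_self_eq_true, if_pos]
        rw [List.filter_append, List.filter_singleton]
        have hfilt : eps.filter (fun q => q.1 == p.1) = [] := by
          rw [List.filter_eq_nil_iff]
          intro q hq hbeq
          exact hp (List.mem_map.mpr ⟨q, hq, by simpa using hbeq⟩)
        simp [hfilt]
        rfl

-- B's distinct-starts loop computes exactly set(map fst eps) in first-occurrence order
theorem pv_collect_eq_add (acc : List (Int × Int)) (p : (Int × Int) × (Int × Int)) :
    pvCollect acc p = PySem.Set.add acc p.1 := by
  simp [pvCollect, PySem.Set.add, PySem.Set.contains]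

theorem pv_starts (eps : List ((Int × Int) × (Int × Int))) :
    eps.foldl pvCollect [] = PySem.Set.ofList (eps.map (·.1)) := by
  rw [PySem.Set.ofList_eq_foldl, List.foldl_map]
  rw [funext fun acc => funext fun p => pv_collect_eq_add acc p]

theorem pv_main (eps : List ((Int × Int) × (Int × Int))) :
    (eps.foldl pvStepA PySem.Dict.empty).items.map (fun kv => (kv.1.1, kv.1.2, (PySem.Set.len kv.2 : Int)))
      = (eps.foldl pvCollect []).map (fun sp => (sp.1, sp.2,
          (PySem.Set.len (PySem.Set.ofList ((eps.filter (fun q => q.1 == sp)).map (·.2))) : Int))) := by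
  rw [pv_itemsA, pv_starts, List.map_map]
  rfl

-- ===== VERDICT (by name: the statement is the Claim_ definition above) =====
theorem trailhead_scores_spec : Claim_equal_trailhead_scores := by
  intro trails _ _
  unfold Spec_trailhead_scores trailhead_scores trailhead_scores_alt
  exact pv_main (trails.map pvEndpoint)
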